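-- pv_equiv track=rewrite | github.com/canemitz/advent-of-code | 2021/day15_old.py | get_vertex_in_Q_with_smallest_dist
-- ===== SOURCE A (Python) =====
-- def get_vertex_in_Q_with_smallest_dist(Q, dist, sort_dist):
--     dist_in_Q = {}
--
--     # Get the dist dictionary for only the vertices in the set Q
--     for v in dist:
--         if v in Q:
--             dist_in_Q[v] = dist[v]
--
--     # Sort dist_in_Q by value
--     dist_in_Q_sorted = sort_dict(dist_in_Q) if sort_dist else dist_in_Q
--
--     u = None
--     for v in dist_in_Q_sorted:
--         u = v
--         break
--
--     return u
--
-- def sort_dict(dictionary):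
--     # Get an iterable of tuples, where tuple[0] is the key, and tuple[1] is the value
--     list_of_tuples = dictionary.items()
--
--     # Sort the list of tuples by the dictionary value
--     sorted_tuples = sorted(list_of_tuples, key=lambda entry: entry[1])
--
--     # Stuff the sorted list of tuples back into a dictionary
--     sorted_dict = {key: val for key, val in sorted_tuples}
--
--     return sorted_dict
-- ===== SOURCE B (Python) =====
-- def get_vertex_in_Q_with_smallest_dist(Q, dist, sort_dist):
--     # Single scan over dist in iteration order; no intermediate dict, no sort.
--     if not sort_dist:
--         for v in dist:
--             if v in Q:
--                 return v
--         return None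
--     best = None
--     for v, dv in dist.items():
--         if v in Q and (best is None or dv < best[1]):
--             best = (v, dv)
--     return best[0] if best is not None else None
-- ===== Notes on version B (the rewrite author's own statement) =====
-- stated objective: simpler
-- what changed: Replaces A's build-a-filtered-dict, stable-sort-by-value, take-first-key pipeline with one direct scan of dist: early return of the first Q-vertex when sort_dist is false, otherwise a running strict-minimum (first minimal vertex, matching the stable sort's tie-breaking).
import Mathlib
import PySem

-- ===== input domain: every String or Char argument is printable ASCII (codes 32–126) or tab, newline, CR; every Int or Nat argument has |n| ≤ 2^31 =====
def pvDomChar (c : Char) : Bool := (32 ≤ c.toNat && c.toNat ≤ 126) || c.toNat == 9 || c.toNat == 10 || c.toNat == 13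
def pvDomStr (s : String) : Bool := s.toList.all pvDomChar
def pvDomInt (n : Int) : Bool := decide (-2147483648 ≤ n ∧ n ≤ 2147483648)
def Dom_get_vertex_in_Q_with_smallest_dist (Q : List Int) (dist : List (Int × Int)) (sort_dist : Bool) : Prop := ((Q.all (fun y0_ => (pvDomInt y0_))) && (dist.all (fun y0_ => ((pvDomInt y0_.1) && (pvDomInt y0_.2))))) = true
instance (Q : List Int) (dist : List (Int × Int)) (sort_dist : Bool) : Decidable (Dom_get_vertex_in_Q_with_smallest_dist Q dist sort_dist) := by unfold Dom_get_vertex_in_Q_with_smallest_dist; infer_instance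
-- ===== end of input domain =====

-- B replaces A's filter-into-a-dict / stable-sort-by-value / take-first-key pipeline with one
-- direct scan of dist (early return when sort_dist is false, running strict minimum otherwise).

-- ===== PORT A =====
-- helper sort_dict: sorted(d.items(), key=value) stuffed back into a dict
def sort_dict (d : PySem.Dict Int Int) : PySem.Dict Int Int :=
  PySem.Dict.ofList (PySem.List.sorted d.items (fun e => e.2))

def get_vertex_in_Q_with_smallest_dist (Q : List Int) (dist : List (Int × Int)) (sort_dist : Bool) : Option Int :=
  let d := PySem.Dict.ofList dist
  -- for v in dist: if v in Q: dist_in_Q[v] = dist[v]   (v ranges over the dict's keys;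
  -- dist[v] never raises since v is a key, so getD's default 0 is never used)
  let dist_in_Q := d.keys.foldl
    (fun acc v => if Q.contains v then acc.insert v (d.getD v 0) else acc) PySem.Dict.empty
  let dist_in_Q_sorted := if sort_dist then sort_dict dist_in_Q else dist_in_Q
  -- u = None; for v in dist_in_Q_sorted: u = v; break; return u  = first key, if any
  dist_in_Q_sorted.keys.head?

-- ===== PORT B =====
-- if not sort_dist: return the first v in dist with v in Q (early return), else None
def pvAltFind (Q : List Int) : List (Int × Int) → Option Int
  | [] => none
  | (k, _) :: rest => if Q.contains k then some k else pvAltFind Q rest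

-- running best over (v, dv) pairs: update when v in Q and (best is None or dv < best[1])
def pvAltBest (Q : List Int) : List (Int × Int) → Option (Int × Int) → Option Int
  | [], best => best.map (·.1)
  | (k, v) :: rest, best =>
    if Q.contains k && (match best with | none => true | some b => decide (v < b.2))
    then pvAltBest Q rest (some (k, v)) else pvAltBest Q rest best

def get_vertex_in_Q_with_smallest_dist_alt (Q : List Int) (dist : List (Int × Int)) (sort_dist : Bool) : Option Int :=
  let d := PySem.Dict.ofList dist
  if sort_dist then pvAltBest Q d.items none else pvAltFind Q d.items

-- ===== PRECONDITION & SPEC =====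
def Spec_get_vertex_in_Q_with_smallest_dist (Q : List Int) (dist : List (Int × Int)) (sort_dist : Bool) (out : Option Int) : Prop := out = get_vertex_in_Q_with_smallest_dist_alt Q dist sort_dist
instance (Q : List Int) (dist : List (Int × Int)) (sort_dist : Bool) (out : Option Int) : Decidable (Spec_get_vertex_in_Q_with_smallest_dist Q dist sort_dist out) := by unfold Spec_get_vertex_in_Q_with_smallest_dist; infer_instance

-- ===== CLAIM (what is proved, stated in full; the proofs are below) =====
def Claim_equal_get_vertex_in_Q_with_smallest_dist : Prop := ∀ (Q : List Int) (dist : List (Int × Int)) (sort_dist : Bool), Dom_get_vertex_in_Q_with_smallest_dist Q dist sort_dist → Spec_get_vertex_in_Q_with_smallest_dist Q dist sort_dist (get_vertex_in_Q_with_smallest_dist Q dist sort_dist)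

-- ===== LEMMAS AND PROOFS =====

-- the running-best step of Python's min-with-key loop
def pvStep (best : Option (Int × Int)) (x : Int × Int) : Option (Int × Int) :=
  match best with
  | none => some x
  | some m => if x.2 < m.2 then some x else some m

lemma pvAltFind_eq (Q : List Int) (l : List (Int × Int)) :
    pvAltFind Q l = ((l.filter (fun p => Q.contains p.1)).head?).map (·.1) := by
  induction l with
  | nil => rfl
  | cons p rest ih =>
    obtain ⟨k, v⟩ := p
    by_cases h : k ∈ Q
    · simp [pvAltFind, h]
    · simp [pvAltFind, h, ih]

lemma pvAltBest_eq (Q : List Int) (l : List (Int × Int)) (best : Option (Int × Int)) :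
    pvAltBest Q l best = ((l.filter (fun p => Q.contains p.1)).foldl pvStep best).map (·.1) := by
  induction l generalizing best with
  | nil => rfl
  | cons p rest ih =>
    obtain ⟨k, v⟩ := p
    by_cases h : k ∈ Q
    · cases best with
      | none => simp [pvAltBest, h, pvStep, ih]
      | some m =>
        by_cases hv : v < m.2
        · simp [pvAltBest, h, hv, pvStep, ih]
        · simp [pvAltBest, h, hv, pvStep, ih]
    · simp [pvAltBest, h, ih]

-- head of one insertion step of the stable insertion sort = one running-best step
lemma head?_insertBy (x : Int × Int) (acc : List (Int × Int)) :
    (PySem.List.insertBy (fun a b => decide (a.2 < b.2)) x acc).head? = pvStep acc.head? x := by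
  cases acc with
  | nil => rfl
  | cons h t =>
    by_cases hx : x.2 < h.2
    · simp [PySem.List.insertBy, hx, pvStep]
    · simp [PySem.List.insertBy, hx, pvStep]

-- head of the stable sort by value = the running strict-minimum scan
lemma head?_sorted_eq (l : List (Int × Int)) :
    (PySem.List.sorted l (fun e => e.2)).head? = l.foldl pvStep none := by
  rw [PySem.List.sorted_eq_foldl_insertBy]
  have gen : ∀ (l : List (Int × Int)) (acc : List (Int × Int)),
      (l.foldl (fun acc x => PySem.List.insertBy (fun a b => decide (a.2 < b.2)) x acc) acc).head?
        = l.foldl pvStep acc.head? := by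
    intro l
    induction l with
    | nil => intro acc; rfl
    | cons x rest ih =>
      intro acc
      simp only [List.foldl_cons, ih, head?_insertBy]
  simpa using gen l []

lemma main_eq (Q : List Int) (dist : List (Int × Int)) (sort_dist : Bool) :
    Spec_get_vertex_in_Q_with_smallest_dist Q dist sort_dist (get_vertex_in_Q_with_smallest_dist Q dist sort_dist) := by
  unfold Spec_get_vertex_in_Q_with_smallest_dist
  unfold get_vertex_in_Q_with_smallest_dist get_vertex_in_Q_with_smallest_dist_alt
  set d := PySem.Dict.ofList dist with hd
  have hn : d.keys.Nodup := PySem.Dict.nodup_keys_ofList dist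
  -- the keys of d that lie in Q, and the corresponding filtered items
  set l := d.keys.filter (fun v => Q.contains v) with hlq
  have hlnd : l.Nodup := hn.filter _
  -- A's filtered dict has items  l.map (fun a => (a, d.getD a 0))
  have hfold : d.keys.foldl
      (fun acc v => if Q.contains v then acc.insert v (d.getD v 0) else acc) PySem.Dict.empty
      = l.foldl (fun acc v => acc.insert v (d.getD v 0)) PySem.Dict.empty := by
    rw [hlq, List.foldl_filter]
  have hfitems : (l.foldl (fun acc v => acc.insert v (d.getD v 0)) PySem.Dict.empty).items
      = l.map (fun a => (a, d.getD a 0)) := by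
    have := PySem.Dict.items_foldl_insert_fresh (l := l) (k := fun a => a)
      (v := fun a => d.getD a 0) (d := PySem.Dict.empty)
      (by intro a _; exact PySem.Dict.contains_empty a) (by simpa using hlnd)
    simpa using this
  -- d.items filtered by Q is the same list
  have hditems : d.items.filter (fun p => Q.contains p.1) = l.map (fun a => (a, d.getD a 0)) := by
    rw [PySem.Dict.items_eq_map_keys d hn 0, List.filter_map, hlq]
    rfl
  cases sort_dist with
  | false =>
    simp only [Bool.false_eq_true, if_false, hfold]
    rw [pvAltFind_eq, hditems]
    simp [PySem.Dict.keys, hfitems, List.head?_map, List.map_map, Option.map_map]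
  | true =>
    simp only [hfold, if_pos trivial]
    rw [pvAltBest_eq, hditems]
    -- A's side: keys of sort_dict of the filtered dict
    unfold sort_dict
    set M := l.map (fun a => (a, d.getD a 0)) with hM
    rw [hfitems]
    have hMnodup : (M.map (fun p => p.1)).Nodup := by
      rw [hM, List.map_map]
      simpa [Function.comp_def] using hlnd
    have hsortnodup : ((PySem.List.sorted M (fun e => e.2)).map (fun p => p.1)).Nodup :=
      (((PySem.List.sorted_perm M (fun e => e.2) false).map (fun p => p.1))).nodup_iff.mpr hMnodup
    have hkeys : (PySem.Dict.ofList (PySem.List.sorted M (fun e => e.2))).items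
        = PySem.List.sorted M (fun e => e.2) := by
      have := PySem.Dict.items_foldl_insert_fresh (l := PySem.List.sorted M (fun e => e.2))
        (k := fun p => p.1) (v := fun p => p.2) (d := PySem.Dict.empty)
        (by intro a _; exact PySem.Dict.contains_empty a.1) hsortnodup
      simpa using this
    simp only [PySem.Dict.keys, hkeys]
    rw [List.head?_map, head?_sorted_eq]


-- ===== VERDICT (by name: the statement is the Claim_ definition above) =====
theorem get_vertex_in_Q_with_smallest_dist_spec : Claim_equal_get_vertex_in_Q_with_smallest_dist := by
  intro Q dist sort_dist _
  exact main_eq Q dist sort_dist
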